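-- pv_equiv track=rewrite | github.com/kagemeka/dsalgo-python | src/dsalgo/euler_tour.py | compute_depth
-- ===== SOURCE A (Python) =====
-- import typing
--
-- def compute_parent(
--     tour_edges: typing.List[int],
-- ) -> typing.List[typing.Optional[int]]:
--     """Compute parent from Euler-tour-on-edges.
--
--     Args:
--         tour_edges (typing.List[int]): euler tour on edges.
--
--     Returns:
--         typing.List[typing.Optional[int]]:
--             parent list.
--             the tour root's parent is None.
--
--     Examples:
--         >>> tour_edges = [0, 1, 4, -5, 2, -3, -2, 3, -4, -1]
--         >>> compute_parent(tour_edges)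
--         [None, 0, 1, 0, 1]
--     """
--     n = len(tour_edges) >> 1
--     parent: typing.List[typing.Optional[int]] = [None] * n
--     st = [tour_edges[0]]
--     for u in tour_edges[1:]:
--         if u < 0:
--             st.pop()
--             continue
--         parent[u] = st[-1]
--         st.append(u)
--
--     return parent
--
-- def compute_depth(tour_edges: typing.List[int]) -> typing.List[int]:
--     """Compute depth from Euler-tour-on-edges.
--
--     Args:
--         tour_edges (typing.List[int]): euler tour on edges.
--
--     Returns:
--         typing.List[int]: depth list.
--
--     Examples:
--         >>> tour_edges = [0, 1, 4, -5, 2, -3, -2, 3, -4, -1]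
--         >>> compute_depth(tour_edges)
--         [0, 1, 2, 1, 2]
--
--     """
--     n = len(tour_edges) >> 1
--     parent = compute_parent(tour_edges)
--     depth = [0] * n
--     for u in tour_edges[1:]:
--         if u < 0:
--             continue
--         p = parent[u]
--         assert p is not None
--         depth[u] = depth[p] + 1
--     return depth
-- ===== SOURCE B (Python) =====
-- def compute_depth(tour_edges):
--     # One fused pass: depth of a pushed node is the current stack height
--     # (its parent sits on top of the stack at depth len(st) - 1).
--     n = len(tour_edges) >> 1
--     depth = [0] * n
--     st = [tour_edges[0]]
--     for u in tour_edges[1:]: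
--         if u < 0:
--             st.pop()
--         else:
--             depth[u] = len(st)
--             st.append(u)
--     return depth
-- ===== Notes on version B (the rewrite author's own statement) =====
-- stated objective: simpler
-- what changed: B fuses A's two passes into one and drops the parent array entirely: depth is read off as the current stack height at each push, instead of first building a parent list and then re-walking the tour accumulating depth[u] = depth[parent[u]] + 1.
-- outside the precondition, e.g. on compute_depth([1, 1, -1, 0]): A returns [2, 1], B returns [1, 1]; on compute_depth([-2, 1, -6, 2, -8, -6]): A returns [0, 1, 2], B returns [0, 1, 1]; on compute_depth([2, 1, 2, -3, -5, 0, -7, -4]): A returns [3, 1, 2, 0], B returns [1, 1, 2, 0]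
import Mathlib
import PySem

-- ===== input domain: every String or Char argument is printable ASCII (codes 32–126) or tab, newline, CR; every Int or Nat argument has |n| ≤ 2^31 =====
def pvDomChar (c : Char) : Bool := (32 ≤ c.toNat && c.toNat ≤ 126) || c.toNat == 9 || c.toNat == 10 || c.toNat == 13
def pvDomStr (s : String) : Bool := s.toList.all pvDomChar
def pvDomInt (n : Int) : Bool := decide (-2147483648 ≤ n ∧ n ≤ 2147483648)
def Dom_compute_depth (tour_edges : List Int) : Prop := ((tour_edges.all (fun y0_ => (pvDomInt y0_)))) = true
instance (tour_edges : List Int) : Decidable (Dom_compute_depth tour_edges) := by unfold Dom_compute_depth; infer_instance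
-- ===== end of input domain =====

-- B fuses A's two passes into one and drops the parent array: depth[u] is the stack height at u's push.
-- Equivalence is claimed on Pre_: tours whose positive entries are distinct in-range labels with
-- balanced pops; elsewhere A raises or its value is an artefact of aliasing/negative-index wraparound.

-- ===== PORT A =====
-- one step of compute_parent's loop (Option threads Python's IndexError)
def pvStepP1 (acc : Option (List (Option Int) × List Int)) (u : Int) :
    Option (List (Option Int) × List Int) :=
  match acc with
  | none => none
  | some (parent, st) =>
    if u < 0 then
      match PySem.List.pop? st (-1) with
      | none => none
      | some (_, st') => some (parent, st')
    else
      match PySem.List.pyGet? st (-1) with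
      | none => none
      | some top =>
        match PySem.List.pySet? parent u (some top) with
        | none => none
        | some parent' => some (parent', st ++ [u])

-- compute_parent (helper of A); none = the Python raises
def pvComputeParent? (tour_edges : List Int) : Option (List (Option Int)) :=
  let n : Int := PySem.List.len tour_edges >>> 1
  let parent : List (Option Int) := List.replicate n.toNat none
  match PySem.List.pyGet? tour_edges 0 with
  | none => none
  | some t0 =>
    match (PySem.List.slice tour_edges (some 1) none).foldl pvStepP1 (some (parent, [t0])) with
    | none => none
    | some (parent', _) => some parent'

-- one step of compute_depth's second loop, over the finished parent list
def pvStepP2 (parent : List (Option Int)) (acc : Option (List Int)) (u : Int) :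
    Option (List Int) :=
  match acc with
  | none => none
  | some depth =>
    if u < 0 then some depth
    else
      match PySem.List.pyGet? parent u with
      | none => none
      | some none => none              -- assert p is not None fails
      | some (some p) =>
        match PySem.List.pyGet? depth p with
        | none => none
        | some dp =>
          match PySem.List.pySet? depth u (dp + 1) with
          | none => none
          | some depth' => some depth'

def compute_depth (tour_edges : List Int) : List Int :=
  (match pvComputeParent? tour_edges with
   | none => none
   | some parent =>
     let n : Int := PySem.List.len tour_edges >>> 1
     let depth : List Int := List.replicate n.toNat 0
     (PySem.List.slice tour_edges (some 1) none).foldl (pvStepP2 parent) (some depth)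
  ).getD []    -- `.getD []` only covers inputs outside Pre_, where the Python raises

-- ===== PORT B =====
-- one step of B's fused loop: pop on a negative entry, else depth[u] := len(st) and push u
def pvStepB (acc : Option (List Int × List Int)) (u : Int) : Option (List Int × List Int) :=
  match acc with
  | none => none
  | some (depth, st) =>
    if u < 0 then
      match PySem.List.pop? st (-1) with
      | none => none
      | some (_, st') => some (depth, st')
    else
      match PySem.List.pySet? depth u (PySem.List.len st) with
      | none => none
      | some depth' => some (depth', st ++ [u])

def compute_depth_alt (tour_edges : List Int) : List Int :=
  (match PySem.List.pyGet? tour_edges 0 with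
   | none => none
   | some t0 =>
     let n : Int := PySem.List.len tour_edges >>> 1
     let depth : List Int := List.replicate n.toNat 0
     ((PySem.List.slice tour_edges (some 1) none).foldl pvStepB (some (depth, [t0]))).map Prod.fst
  ).getD []    -- `.getD []` only covers inputs outside Pre_, where the Python raises

-- ===== PRECONDITION & SPEC =====
-- Pre_ admits edge-tours whose nonnegative entries after the head are distinct labels < len/2 and
-- whose pops never exhaust the stack (and, if anything is pushed, a valid head label not pushed again).
-- It excludes inputs where A raises (IndexError/failed assert) and inputs with duplicate or
-- out-of-range labels, on which A still returns but its value is an accident of last-write aliasing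
-- or Python negative-index wraparound while B reports the plain stack height.
def Pre_compute_depth (tour_edges : List Int) : Prop :=
  match tour_edges with
  | [] => False
  | t0 :: tl =>
    let n : Int := ((tl.length + 1 : Nat) : Int) / 2
    let pushes := tl.filter (fun u => decide (0 ≤ u))
    pushes.Nodup ∧
    (∀ u ∈ pushes, u < n) ∧
    t0 ∉ pushes ∧
    (∀ k, k < tl.length →
      (tl.take k).countP (fun u => decide (u < 0)) ≤ (tl.take k).countP (fun u => decide (0 ≤ u))) ∧
    (pushes ≠ [] → 0 ≤ t0 ∧ t0 < n)
instance (tour_edges : List Int) : Decidable (Pre_compute_depth tour_edges) := by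
  unfold Pre_compute_depth; cases tour_edges <;> infer_instance

def pvWitness_compute_depth : List Int := [0, 1, 4, -5, 2, -3, -2, 3, -4, -1]

def Spec_compute_depth (tour_edges : List Int) (out : List Int) : Prop := out = compute_depth_alt tour_edges
instance (tour_edges : List Int) (out : List Int) : Decidable (Spec_compute_depth tour_edges out) := by unfold Spec_compute_depth; infer_instance

-- ===== CLAIM (what is proved, stated in full; the proofs are below) =====
def Claim_equal_compute_depth : Prop := ∀ (tour_edges : List Int), Dom_compute_depth tour_edges → Pre_compute_depth tour_edges → Spec_compute_depth tour_edges (compute_depth tour_edges)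

-- ===== LEMMAS AND PROOFS =====

theorem pv_foldl_p1_none (r : List Int) : r.foldl pvStepP1 none = none := by
  induction r with
  | nil => rfl
  | cons u r ih => simpa [pvStepP1] using ih

theorem pv_pySet?_some {α : Type} (xs : List α) (i : Int) (v : α) (ys : List α)
    (hi : 0 ≤ i) (h : PySem.List.pySet? xs i v = some ys) : ys = xs.set i.toNat v := by
  have h2 := PySem.List.pySetD_of_nonneg xs v hi
  simp [PySem.List.pySetD, h] at h2
  exact h2

theorem pv_pySet?_int {α : Type} (xs : List α) (i : Int) (v : α)
    (hi : 0 ≤ i) (hl : i.toNat < xs.length) :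
    PySem.List.pySet? xs i v = some (xs.set i.toNat v) := by
  obtain ⟨k, rfl⟩ : ∃ k : Nat, i = (k : Int) := ⟨i.toNat, (Int.toNat_of_nonneg hi).symm⟩
  simp only [Int.toNat_natCast]
  exact PySem.List.pySet?_natCast xs k v (by simpa using hl)

theorem pv_pop?_neg_one {α : Type} (xs : List α) (h : xs ≠ []) :
    PySem.List.pop? xs (-1) = some (xs.getLast h, xs.dropLast) := by
  conv_lhs => rw [← List.dropLast_append_getLast h]
  exact PySem.List.pop?_last _ _

-- pass 1 never touches parent entries whose label is not pushed in the remaining tour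
theorem pv_parent_stable (r : List Int) :
    ∀ (parent : List (Option Int)) (st : List Int) (parentF : List (Option Int)) (stF : List Int),
    r.foldl pvStepP1 (some (parent, st)) = some (parentF, stF) →
    ∀ (j : Int), 0 ≤ j → j ∉ r.filter (fun u => decide (0 ≤ u)) →
    parentF[j.toNat]? = parent[j.toNat]? := by
  induction r with
  | nil => intro parent st parentF stF h j _ _; simp at h; rw [h.1]
  | cons u r ih =>
    intro parent st parentF stF h j hj hjm
    rw [List.foldl_cons] at h
    rcases hstep : pvStepP1 (some (parent, st)) u with _ | s
    · rw [hstep, pv_foldl_p1_none] at h; exact absurd h (by simp)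
    rw [hstep] at h
    by_cases hu : u < 0
    · rcases hpop : PySem.List.pop? st (-1) with _ | pr
      · simp [pvStepP1, hu, hpop] at hstep
      · simp [pvStepP1, hu, hpop] at hstep
        have hjm' : j ∉ r.filter (fun u => decide (0 ≤ u)) := by
          simpa [List.filter_cons, show ¬ (0 ≤ u) by omega] using hjm
        rw [← hstep] at h
        exact ih parent pr.2 parentF stF h j hj hjm'
    · rcases htop : PySem.List.pyGet? st (-1) with _ | top
      · simp [pvStepP1, hu, htop] at hstep
      · rcases hset : PySem.List.pySet? parent u (some top) with _ | parent1
        · simp [pvStepP1, hu, htop, hset] at hstep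
        · simp [pvStepP1, hu, htop, hset] at hstep
          have h0u : 0 ≤ u := by omega
          rw [show (u::r).filter (fun u => decide (0 ≤ u))
                = u :: r.filter (fun u => decide (0 ≤ u)) by simp [h0u]] at hjm
          have hju : j ≠ u := fun hh => hjm (by simp [hh])
          have hjm' : j ∉ r.filter (fun u => decide (0 ≤ u)) :=
            fun hx => hjm (List.mem_cons_of_mem _ hx)
          rw [← hstep] at h
          have hres := ih parent1 (st ++ [u]) parentF stF h j hj hjm'
          rw [hres, pv_pySet?_some parent u (some top) parent1 h0u hset]
          exact List.getElem?_set_ne (by omega)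

-- the main loop invariant: from a common stack and depth array, pass 1 succeeds, and pass 2
-- (over the finished parent) computes exactly the fused pass's depth array with the same stack
theorem pv_main (n : Nat) (r : List Int) :
    ∀ (parent : List (Option Int)) (st : List Int) (depth : List Int),
    parent.length = n → depth.length = n →
    ((r.filter (fun u => decide (0 ≤ u))).Nodup) →
    (∀ u ∈ r, 0 ≤ u → u < (n : Int)) →
    (∀ k, k < r.length →
      (r.take k).countP (fun u => decide (u < 0)) < st.length + (r.take k).countP (fun u => decide (0 ≤ u))) →
    (∀ i (hi : i < st.length), r.filter (fun u => decide (0 ≤ u)) ≠ [] →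
      0 ≤ st[i] ∧ st[i] < (n : Int) ∧ depth[(st[i]).toNat]? = some (i : Int) ∧
      st[i] ∉ r.filter (fun u => decide (0 ≤ u))) →
    ∃ parentF stF depthF,
      r.foldl pvStepP1 (some (parent, st)) = some (parentF, stF) ∧
      r.foldl (pvStepP2 parentF) (some depth) = some depthF ∧
      r.foldl pvStepB (some (depth, st)) = some (depthF, stF) := by
  induction r with
  | nil =>
    intro parent st depth _ _ _ _ _ _
    exact ⟨parent, st, depth, rfl, rfl, rfl⟩
  | cons u r ih =>
    intro parent st depth hpl hdl hnd hbound hbal hinv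
    have hlenpos : 0 < st.length := by simpa using hbal 0 (by simp)
    have hst : st ≠ [] := List.ne_nil_of_length_pos hlenpos
    by_cases hu : u < 0
    · -- pop
      have hpop := pv_pop?_neg_one st hst
      have hfilt : (u :: r).filter (fun v => decide (0 ≤ v)) = r.filter (fun v => decide (0 ≤ v)) := by
        simp [show ¬ (0 ≤ u) by omega]
      have hstep1 : pvStepP1 (some (parent, st)) u = some (parent, st.dropLast) := by
        simp [pvStepP1, hu, hpop]
      have hstepB : pvStepB (some (depth, st)) u = some (depth, st.dropLast) := by
        simp [pvStepB, hu, hpop]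
      obtain ⟨pF, sF, dF, h1, h2, h3⟩ := ih parent st.dropLast depth hpl hdl
        (by rw [← hfilt]; exact hnd)
        (fun v hv hv0 => hbound v (List.mem_cons_of_mem _ hv) hv0)
        (by
          intro k hk
          have hb := hbal (k + 1) (by simp; omega)
          simp only [List.take_succ_cons, List.countP_cons] at hb
          simp only [List.length_dropLast]
          have hdu : (decide (u < 0) : Bool) = true := by simp [hu]
          have hdu' : (decide (0 ≤ u) : Bool) = false := by simp; omega
          rw [hdu, hdu'] at hb
          simp at hb
          omega)
        (by
          intro i hi hne
          have hi' : i < st.length := by simp at hi; omega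
          have hres := hinv i hi' (by rw [hfilt]; exact hne)
          rw [← hfilt]
          simpa [List.getElem_dropLast] using hres)
      refine ⟨pF, sF, dF, ?_, ?_, ?_⟩
      · rw [List.foldl_cons, hstep1]; exact h1
      · rw [List.foldl_cons, show pvStepP2 pF (some depth) u = some depth by simp [pvStepP2, hu]]
        exact h2
      · rw [List.foldl_cons, hstepB]; exact h3
    · -- push
      have h0u : 0 ≤ u := by omega
      have hfilt : (u :: r).filter (fun v => decide (0 ≤ v)) = u :: r.filter (fun v => decide (0 ≤ v)) := by
        simp [h0u]
      have hne : (u :: r).filter (fun v => decide (0 ≤ v)) ≠ [] := by rw [hfilt]; simp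
      have hun : u < (n : Int) := hbound u (by simp) h0u
      have huN : u.toNat < n := by omega
      have hi0 : st.length - 1 < st.length := by omega
      obtain ⟨htop0, htopn, htopd, htopm⟩ := hinv (st.length - 1) hi0 hne
      have hgl : st.getLast hst = st[st.length - 1] := List.getLast_eq_getElem hst
      have htop? : PySem.List.pyGet? st (-1) = some (st[st.length - 1]) := by
        rw [PySem.List.pyGet?_neg_one, List.getLast?_eq_some_getLast hst, hgl]
      rw [hfilt] at htopm
      have htopne : st[st.length - 1] ≠ u := fun hh => htopm (by simp [hh])
      have htopm' : st[st.length - 1] ∉ r.filter (fun v => decide (0 ≤ v)) :=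
        fun hx => htopm (List.mem_cons_of_mem _ hx)
      rw [hfilt] at hnd
      have hund : u ∉ r.filter (fun v => decide (0 ≤ v)) := (List.nodup_cons.mp hnd).1
      have hnd' := (List.nodup_cons.mp hnd).2
      have hsetp : PySem.List.pySet? parent u (some (st[st.length - 1])) =
          some (parent.set u.toNat (some (st[st.length - 1]))) :=
        pv_pySet?_int parent u _ h0u (by rw [hpl]; exact huN)
      have hstep1 : pvStepP1 (some (parent, st)) u =
          some (parent.set u.toNat (some (st[st.length - 1])), st ++ [u]) := by
        simp [pvStepP1, hu, htop?, hsetp]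
      have hsetd : PySem.List.pySet? depth u ((st.length : Int)) =
          some (depth.set u.toNat (st.length : Int)) :=
        pv_pySet?_int depth u _ h0u (by rw [hdl]; exact huN)
      have hstepB : pvStepB (some (depth, st)) u =
          some (depth.set u.toNat (st.length : Int), st ++ [u]) := by
        simp [pvStepB, hu, PySem.List.len_eq, hsetd]
      obtain ⟨pF, sF, dF, h1, h2, h3⟩ := ih
        (parent.set u.toNat (some (st[st.length - 1]))) (st ++ [u])
        (depth.set u.toNat (st.length : Int))
        (by simp [hpl]) (by simp [hdl]) hnd'
        (fun v hv hv0 => hbound v (List.mem_cons_of_mem _ hv) hv0)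
        (by
          intro k hk
          have hb := hbal (k + 1) (by simp; omega)
          simp only [List.take_succ_cons, List.countP_cons] at hb
          have hdu : (decide (u < 0) : Bool) = false := by simp; omega
          have hdu' : (decide (0 ≤ u) : Bool) = true := by simp [h0u]
          rw [hdu, hdu'] at hb
          simp only [List.length_append, List.length_cons, List.length_nil]
          simp at hb
          omega)
        (by
          intro i hi hne'
          simp only [List.length_append, List.length_cons, List.length_nil] at hi
          rcases Nat.lt_or_ge i st.length with hlt | hge
          · -- an old stack entry
            have hgeti : (st ++ [u])[i]'(by simp; omega) = st[i] := List.getElem_append_left hlt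
            obtain ⟨ha, hb', hc, hd⟩ := hinv i hlt hne
            rw [hfilt] at hd
            have hdne : st[i] ≠ u := fun hh => hd (by simp [hh])
            have hd' : st[i] ∉ r.filter (fun v => decide (0 ≤ v)) :=
              fun hx => hd (List.mem_cons_of_mem _ hx)
            rw [hgeti]
            refine ⟨ha, hb', ?_, hd'⟩
            rw [List.getElem?_set_ne (by omega)]
            exact hc
          · -- the new top u
            have hieq : i = st.length := by omega
            subst hieq
            have hgeti : (st ++ [u])[st.length]'(by simp) = u := by
              simp
            rw [hgeti]
            refine ⟨h0u, hun, ?_, hund⟩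
            rw [List.getElem?_set_self (by rw [hdl]; exact huN)]
        )
      refine ⟨pF, sF, dF, ?_, ?_, ?_⟩
      · rw [List.foldl_cons, hstep1]; exact h1
      · rw [List.foldl_cons]
        have hpFu : pF[u.toNat]? = some (some (st[st.length - 1])) := by
          rw [pv_parent_stable r _ _ pF sF h1 u h0u hund]
          exact List.getElem?_set_self (by simp [hpl]; exact huN)
        have hget1 : PySem.List.pyGet? pF u = some (some (st[st.length - 1])) := by
          rw [PySem.List.pyGet?_of_nonneg pF h0u]; exact hpFu
        have hget2 : PySem.List.pyGet? depth (st[st.length - 1]) =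
            some ((st.length - 1 : Nat) : Int) := by
          rw [PySem.List.pyGet?_of_nonneg depth htop0]; exact htopd
        have hsetd2 : PySem.List.pySet? depth u (((st.length - 1 : Nat) : Int) + 1) =
            some (depth.set u.toNat (st.length : Int)) := by
          rw [show (((st.length - 1 : Nat) : Int) + 1) = (st.length : Int) by omega]
          exact hsetd
        rw [show pvStepP2 pF (some depth) u = some (depth.set u.toNat (st.length : Int)) by
          simp [pvStepP2, hu, hget1, hget2, hsetd2]]
        exact h2
      · rw [List.foldl_cons, hstepB]; exact h3

theorem pv_shift_toNat (m : Nat) : ((m : Int) >>> 1).toNat = m / 2 := by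
  rw [show ((m : Int) >>> 1) = ((m >>> 1 : Nat) : Int) from (Int.natCast_shiftRight m 1).symm]
  simp [Nat.shiftRight_eq_div_pow]
  omega

theorem pv_n_cast (m : Nat) : ((m / 2 : Nat) : Int) = (m : Int) / 2 := by
  exact_mod_cast Int.natCast_div m 2

-- ===== VERDICT (by name: the statement is the Claim_ definition above) =====
theorem compute_depth_spec : Claim_equal_compute_depth := by
  intro t hdom hpre
  unfold Spec_compute_depth
  match t with
  | [] => exact absurd hpre (by simp [Pre_compute_depth])
  | t0 :: tl =>
    unfold Pre_compute_depth at hpre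
    obtain ⟨hnd, hbound, hmem, hbal, hc⟩ := hpre
    have hncast : ((tl.length + 1 : Nat) : Int) / 2 = (((tl.length + 1) / 2 : Nat) : Int) :=
      (pv_n_cast (tl.length + 1)).symm
    rw [hncast] at hbound hc
    obtain ⟨pF, sF, dF, h1, h2, h3⟩ := pv_main ((tl.length + 1) / 2) tl
      (List.replicate ((tl.length + 1) / 2) none) [t0]
      (List.replicate ((tl.length + 1) / 2) (0 : Int))
      (by simp) (by simp) hnd
      (by
        intro v hv hv0
        exact hbound v (List.mem_filter.mpr ⟨hv, by simp [hv0]⟩))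
      (by
        intro k hk
        have := hbal k hk
        simp only [List.length_cons]
        omega)
      (by
        intro i hi hne
        have hieq : i = 0 := by simp at hi; omega
        subst hieq
        obtain ⟨ht0, ht1⟩ := hc hne
        have hlt : t0.toNat < (tl.length + 1) / 2 := by omega
        refine ⟨ht0, ht1, ?_, hmem⟩
        simp [hlt])
    have hn : (PySem.List.len (t0 :: tl) >>> 1).toNat = (tl.length + 1) / 2 := by
      rw [PySem.List.len_eq, List.length_cons]
      exact pv_shift_toNat (tl.length + 1)
    rw [compute_depth, compute_depth_alt, pvComputeParent?]
    simp only [PySem.List.pyGet?_zero_cons, PySem.List.slice_from_one, List.tail_cons, hn]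
    rw [h1]
    simp only [h2, h3, Option.map_some, Option.getD_some]
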